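-- pv_equiv track=rewrite | github.com/SapphireFeiFei24/coding_questions | leetcodes/Q2718_Sum_of_Matrix_After_Queries.py | matrixSumQueries
-- ===== SOURCE A (Python) =====
-- from typing import List
--
-- def matrixSumQueries(n: int, queries: List[List[int]]) -> int:
--     nr, nc = n, n
--     formulars = []
--     is_row_changed = [False for i in range(n)]
--     is_col_changed = [False for i in range(n)]
--     for i in range(len(queries) - 1, -1, -1):
--         t, idx, val = queries[i]
--         if t == 0 and not is_row_changed[idx]:
--             formulars.append([nr, val])
--             is_row_changed[idx] = True
--             nc -= 1
--         elif t == 1 and not is_col_changed[idx]: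
--             formulars.append([nc, val])
--             is_col_changed[idx] = True
--             nr -= 1
--     res = 0
--     for f in formulars:
--         res += f[0] * f[1]
--     return res
-- ===== SOURCE B (Python) =====
-- def matrixSumQueries(n, queries):
--     last_row, last_col = {}, {}
--     for time, q in enumerate(queries):
--         t, idx, val = q[0], q[1], q[2]
--         if t == 0:
--             last_row[idx] = (time, val)
--         elif t == 1:
--             last_col[idx] = (time, val)
--     items = [(tm, 0, v) for (tm, v) in last_row.values()] \
--           + [(tm, 1, v) for (tm, v) in last_col.values()]
--     items.sort(key=lambda e: e[0], reverse=True)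
--     nr = nc = n
--     res = 0
--     for _, t, v in items:
--         if t == 0:
--             res += nr * v
--             nc -= 1
--         else:
--             res += nc * v
--             nr -= 1
--     return res
-- ===== Notes on version B (the rewrite author's own statement) =====
-- stated objective: alternative
-- what changed: Replaces A's reverse index scan with boolean marker arrays and a deferred formulars list by a forward pass building last-assignment dicts per row/column, a sort of those final assignments by descending query time, and a single greedy fold with row/column counters.
-- outside the precondition, e.g. on matrixSumQueries(2, [[0, -1, 5], [0, 1, 7]]): A returns 14, B returns 24
import Mathlib
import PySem

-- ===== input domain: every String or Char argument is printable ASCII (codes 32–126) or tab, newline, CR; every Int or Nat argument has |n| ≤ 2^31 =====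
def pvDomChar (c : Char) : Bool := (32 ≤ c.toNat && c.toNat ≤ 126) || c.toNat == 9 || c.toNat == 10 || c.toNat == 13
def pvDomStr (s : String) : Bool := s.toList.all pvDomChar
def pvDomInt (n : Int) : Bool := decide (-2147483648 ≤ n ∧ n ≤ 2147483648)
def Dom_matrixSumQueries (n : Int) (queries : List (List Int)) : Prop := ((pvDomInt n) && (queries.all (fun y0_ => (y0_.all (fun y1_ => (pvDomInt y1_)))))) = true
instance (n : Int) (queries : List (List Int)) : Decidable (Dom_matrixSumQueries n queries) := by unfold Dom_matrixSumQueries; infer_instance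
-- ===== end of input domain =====

-- B replaces A's reverse index scan over boolean arrays by a forward last-assignment dict pass,
-- a sort by descending query time and a greedy counter fold (objective: alternative, not faster).
-- Neither version mutates its arguments.

-- ===== PORT A =====
def matrixSumQueries (n : Int) (queries : List (List Int)) : Int :=
  let isRow0 : List Bool := (PySem.List.pyRange 0 n 1).map (fun _ => false)
  let isCol0 : List Bool := (PySem.List.pyRange 0 n 1).map (fun _ => false)
  let st :=
    (PySem.List.pyRange ((queries.length : Int) - 1) (-1) (-1)).foldl
      (fun st i =>
        match st with
        | (nr, nc, formulars, isRow, isCol) =>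
          match PySem.List.pyGetD queries i [] with
          | [t, idx, val] =>
            if t = 0 ∧ PySem.List.pyGetD isRow idx false = false then
              (nr, nc - 1, formulars ++ [[nr, val]], PySem.List.pySetD isRow idx true, isCol)
            else if t = 1 ∧ PySem.List.pyGetD isCol idx false = false then
              (nr - 1, nc, formulars ++ [[nc, val]], isRow, PySem.List.pySetD isCol idx true)
            else (nr, nc, formulars, isRow, isCol)
          | _ => (nr, nc, formulars, isRow, isCol))
      (n, n, ([] : List (List Int)), isRow0, isCol0)
  st.2.2.1.foldl (fun res f => res + PySem.List.pyGetD f 0 0 * PySem.List.pyGetD f 1 0) 0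

-- ===== PORT B =====
def matrixSumQueries_alt (n : Int) (queries : List (List Int)) : Int :=
  let dicts :=
    (PySem.List.enumerate queries).foldl
      (fun (d : PySem.Dict Int (Int × Int) × PySem.Dict Int (Int × Int)) p =>
        if PySem.List.pyGetD p.2 0 0 = 0 then
          (d.1.insert (PySem.List.pyGetD p.2 1 0) (p.1, PySem.List.pyGetD p.2 2 0), d.2)
        else if PySem.List.pyGetD p.2 0 0 = 1 then
          (d.1, d.2.insert (PySem.List.pyGetD p.2 1 0) (p.1, PySem.List.pyGetD p.2 2 0))
        else d)
      (PySem.Dict.empty, PySem.Dict.empty)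
  let items :=
    dicts.1.values.map (fun tv => (tv.1, (0 : Int), tv.2)) ++
    dicts.2.values.map (fun tv => (tv.1, (1 : Int), tv.2))
  let sortedItems := PySem.List.sorted items (fun e => e.1) true
  let fin := sortedItems.foldl
      (fun (st : Int × Int × Int) e =>
        if e.2.1 = 0 then (st.1 + st.2.1 * e.2.2, st.2.1, st.2.2 - 1)
        else (st.1 + st.2.2 * e.2.2, st.2.1 - 1, st.2.2))
      (0, n, n)
  fin.1

-- ===== PRECONDITION & SPEC =====
-- Pre_ restricts to the task's natural domain: every query is a triple [t, idx, val] and a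
-- row/column query (t ∈ {0,1}) carries an in-range index 0 ≤ idx < n; outside it A either
-- raises (wrong arity, out-of-range index) or, for a negative index, silently aliases a
-- row/column via Python's negative-index wraparound.
def Pre_matrixSumQueries (n : Int) (queries : List (List Int)) : Prop :=
  ∀ q ∈ queries, q.length = 3 ∧
    ((q.getD 0 0 = 0 ∨ q.getD 0 0 = 1) → 0 ≤ q.getD 1 0 ∧ q.getD 1 0 < n)
instance (n : Int) (queries : List (List Int)) : Decidable (Pre_matrixSumQueries n queries) := by
  unfold Pre_matrixSumQueries; infer_instance

def pvWitness_matrixSumQueries : Int × List (List Int) :=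
  (3, [[0, 1, 5], [1, 2, -4], [0, 1, 7], [2, 9, 9]])

def Spec_matrixSumQueries (n : Int) (queries : List (List Int)) (out : Int) : Prop := out = matrixSumQueries_alt n queries
instance (n : Int) (queries : List (List Int)) (out : Int) : Decidable (Spec_matrixSumQueries n queries out) := by unfold Spec_matrixSumQueries; infer_instance

-- ===== CLAIM (what is proved, stated in full; the proofs are below) =====
def Claim_equal_matrixSumQueries : Prop := ∀ (n : Int) (queries : List (List Int)), Dom_matrixSumQueries n queries → Pre_matrixSumQueries n queries → Spec_matrixSumQueries n queries (matrixSumQueries n queries)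

-- ===== LEMMAS AND PROOFS =====

-- The common core both ports reduce to: fold the deduplicated final assignments, in
-- descending time order, with the two row/column counters.
def sumCoeffs : List (Int × Int × Int) → Int → Int → Int
  | [], _, _ => 0
  | (_, t, v) :: rest, nr, nc =>
    if t = 0 then nr * v + sumCoeffs rest nr (nc - 1)
    else nc * v + sumCoeffs rest (nr - 1) nc

-- the sequence of (time, axis, value) entries A's reverse scan accepts, seen-sets made explicit
def dedupA : List (Int × List Int) → List Int → List Int → List (Int × Int × Int)
  | [], _, _ => []
  | (tm, q) :: rest, R, C =>
    if PySem.List.pyGetD q 0 0 = 0 ∧ PySem.List.pyGetD q 1 0 ∉ R then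
      (tm, 0, PySem.List.pyGetD q 2 0) :: dedupA rest (PySem.Set.add R (PySem.List.pyGetD q 1 0)) C
    else if PySem.List.pyGetD q 0 0 = 1 ∧ PySem.List.pyGetD q 1 0 ∉ C then
      (tm, 1, PySem.List.pyGetD q 2 0) :: dedupA rest R (PySem.Set.add C (PySem.List.pyGetD q 1 0))
    else dedupA rest R C

-- the coefficient/value pairs A appends to `formulars`
def counterMap : List (Int × Int × Int) → Int → Int → List (List Int)
  | [], _, _ => []
  | (_, t, v) :: rest, nr, nc =>
    if t = 0 then [nr, v] :: counterMap rest nr (nc - 1)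
    else [nc, v] :: counterMap rest (nr - 1) nc

-- first-occurrence-per-key dedup of an association list (what a last-write dict is, read backwards)
def dedupFirst : List (Int × (Int × Int)) → List Int → List (Int × (Int × Int))
  | [], _ => []
  | p :: rest, S =>
    if p.1 ∈ S then dedupFirst rest S else p :: dedupFirst rest (PySem.Set.add S p.1)

-- boolean "changed" array of A ↔ seen-set
def ArrRel (n : Int) (arr : List Bool) (S : List Int) : Prop :=
  arr.length = n.toNat ∧
  ∀ j : Int, 0 ≤ j → j < n → (PySem.List.pyGetD arr j false = true ↔ j ∈ S)

def Valid (n : Int) (q : List Int) : Prop :=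
  q.length = 3 ∧
  ((PySem.List.pyGetD q 0 0 = 0 ∨ PySem.List.pyGetD q 0 0 = 1) →
    0 ≤ PySem.List.pyGetD q 1 0 ∧ PySem.List.pyGetD q 1 0 < n)

lemma sumCoeffs_fold (l : List (Int × Int × Int)) (res nr nc : Int) :
    (l.foldl
      (fun (st : Int × Int × Int) e =>
        if e.2.1 = 0 then (st.1 + st.2.1 * e.2.2, st.2.1, st.2.2 - 1)
        else (st.1 + st.2.2 * e.2.2, st.2.1 - 1, st.2.2))
      (res, nr, nc)).1 = res + sumCoeffs l nr nc := by
  induction l generalizing res nr nc with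
  | nil => simp [sumCoeffs]
  | cons e rest ih =>
    obtain ⟨tm, t, v⟩ := e
    by_cases h : t = 0 <;> simp [sumCoeffs, h, ih, add_assoc]

lemma counterMap_sum (l : List (Int × Int × Int)) (nr nc r : Int) :
    (counterMap l nr nc).foldl
      (fun res f => res + PySem.List.pyGetD f 0 0 * PySem.List.pyGetD f 1 0) r
      = r + sumCoeffs l nr nc := by
  induction l generalizing nr nc r with
  | nil => simp [counterMap, sumCoeffs]
  | cons e rest ih =>
    obtain ⟨tm, t, v⟩ := e
    by_cases h : t = 0 <;>
      simp only [counterMap, sumCoeffs, h, if_true, if_false, List.foldl_cons] <;>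
      rw [ih] <;>
      simp [PySem.List.pyGetD, PySem.List.pyGet?, PySem.List.pyIdx?, add_assoc]


-- A's loop body, with the indexed lookup replaced by the enumerated pair (proof helper)
def aStep : (Int × Int × List (List Int) × List Bool × List Bool) → (Int × List Int) →
    (Int × Int × List (List Int) × List Bool × List Bool)
  | (nr, nc, formulars, isRow, isCol), p =>
    match p.2 with
    | [t, idx, val] =>
      if t = 0 ∧ PySem.List.pyGetD isRow idx false = false then
        (nr, nc - 1, formulars ++ [[nr, val]], PySem.List.pySetD isRow idx true, isCol)
      else if t = 1 ∧ PySem.List.pyGetD isCol idx false = false then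
        (nr - 1, nc, formulars ++ [[nc, val]], isRow, PySem.List.pySetD isCol idx true)
      else (nr, nc, formulars, isRow, isCol)
    | _ => (nr, nc, formulars, isRow, isCol)

def bInsStep (d : PySem.Dict Int (Int × Int)) (p : Int × List Int) : PySem.Dict Int (Int × Int) :=
  d.insert (PySem.List.pyGetD p.2 1 0) (p.1, PySem.List.pyGetD p.2 2 0)

lemma afold_main (n : Int) (rx : List (Int × List Int)) :
    ∀ (nr nc : Int) (forms : List (List Int)) (isRow isCol : List Bool) (R C : List Int),
    (∀ p ∈ rx, Valid n p.2) → ArrRel n isRow R → ArrRel n isCol C →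
    (rx.foldl aStep (nr, nc, forms, isRow, isCol)).2.2.1
      = forms ++ counterMap (dedupA rx R C) nr nc := by
  induction rx with
  | nil => intro nr nc forms isRow isCol R C _ _ _; simp [dedupA, counterMap]
  | cons hd tl ih =>
    intro nr nc forms isRow isCol R C hval hR hC
    obtain ⟨tm, q⟩ := hd
    have hq : Valid n q := hval (tm, q) (List.mem_cons_self)
    have hvtl : ∀ p ∈ tl, Valid n p.2 := fun p hp => hval p (List.mem_cons_of_mem _ hp)
    obtain ⟨hlen, hbnd⟩ := hq
    obtain ⟨t, i, v, rfl⟩ : ∃ t i v, q = [t, i, v] := by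
      rcases q with _ | ⟨a, _ | ⟨b, _ | ⟨c, _ | ⟨d, q⟩⟩⟩⟩ <;> simp_all
    have hg0 : PySem.List.pyGetD [t, i, v] 0 0 = t := by
      simp [PySem.List.pyGetD, PySem.List.pyGet?, PySem.List.pyIdx?]
    have hg1 : PySem.List.pyGetD [t, i, v] 1 0 = i := by
      simp [PySem.List.pyGetD, PySem.List.pyGet?, PySem.List.pyIdx?]
    have hg2 : PySem.List.pyGetD [t, i, v] 2 0 = v := by
      simp [PySem.List.pyGetD, PySem.List.pyGet?, PySem.List.pyIdx?]
    simp only [List.foldl_cons, aStep, dedupA, hg0, hg1, hg2]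
    by_cases ht0 : t = 0
    · have hib : 0 ≤ i ∧ i < n := hbnd (by rw [hg0]; left; exact ht0)
      have hiffR : PySem.List.pyGetD isRow i false = false ↔ i ∉ R := by
        have hiff := hR.2 i hib.1 hib.2
        constructor
        · intro hf hmem
          rw [← hiff, hf] at hmem
          exact Bool.false_ne_true hmem
        · intro hnm
          rcases hb : PySem.List.pyGetD isRow i false with _ | _
          · rfl
          · exact absurd (hiff.mp hb) hnm
      by_cases hmem : i ∈ R
      · have hc1 : ¬ (t = 0 ∧ PySem.List.pyGetD isRow i false = false) := by
          intro h; exact (hiffR.mp h.2) hmem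
        have hc2 : ¬ (t = 1 ∧ PySem.List.pyGetD isCol i false = false) := by
          intro h; rw [ht0] at h; exact absurd h.1 (by norm_num)
        have hd1 : ¬ (t = 0 ∧ i ∉ R) := fun h => h.2 hmem
        have hd2 : ¬ (t = 1 ∧ i ∉ C) := by
          intro h; rw [ht0] at h; exact absurd h.1 (by norm_num)
        simp only [if_neg hc1, if_neg hc2, if_neg hd1, if_neg hd2]
        exact ih nr nc forms isRow isCol R C hvtl hR hC
      · have hc1 : t = 0 ∧ PySem.List.pyGetD isRow i false = false :=
          ⟨ht0, hiffR.mpr hmem⟩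
        have hd1 : t = 0 ∧ i ∉ R := ⟨ht0, hmem⟩
        simp only [if_pos hc1, if_pos hd1]
        have hR' : ArrRel n (PySem.List.pySetD isRow i true) (PySem.Set.add R i) := by
          constructor
          · rw [PySem.List.length_pySetD]; exact hR.1
          · intro j hj0 hjn
            have hi' : i = ((i.toNat : ℕ) : ℤ) := (Int.toNat_of_nonneg hib.1).symm
            have hj' : j = ((j.toNat : ℕ) : ℤ) := (Int.toNat_of_nonneg hj0).symm
            have hlt : i.toNat < isRow.length := by
              rw [hR.1]; omega
            rw [hi', hj', PySem.List.pyGetD_pySetD_natCast isRow i.toNat j.toNat true false hlt]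
            rw [PySem.Set.mem_add]
            by_cases hji : j.toNat = i.toNat
            · have : j = i := by omega
              simp [this]
            · have hne : ¬ j = i := by omega
              rw [if_neg hji]
              rw [← hj', ← hi']
              rw [hR.2 j hj0 hjn]
              simp [hne]
        rw [ih nr (nc - 1) (forms ++ [[nr, v]]) _ isCol (PySem.Set.add R i) C hvtl hR' hC]
        simp [counterMap]
    · by_cases ht1 : t = 1
      · have hib : 0 ≤ i ∧ i < n := hbnd (by rw [hg0]; right; exact ht1)
        have hiffC : PySem.List.pyGetD isCol i false = false ↔ i ∉ C := by
          have hiff := hC.2 i hib.1 hib.2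
          constructor
          · intro hf hmem
            rw [← hiff, hf] at hmem
            exact Bool.false_ne_true hmem
          · intro hnm
            rcases hb : PySem.List.pyGetD isCol i false with _ | _
            · rfl
            · exact absurd (hiff.mp hb) hnm
        have hc1 : ¬ (t = 0 ∧ PySem.List.pyGetD isRow i false = false) := fun h => ht0 h.1
        have hd1 : ¬ (t = 0 ∧ i ∉ R) := fun h => ht0 h.1
        by_cases hmem : i ∈ C
        · have hc2 : ¬ (t = 1 ∧ PySem.List.pyGetD isCol i false = false) := by
            intro h; exact (hiffC.mp h.2) hmem
          have hd2 : ¬ (t = 1 ∧ i ∉ C) := fun h => h.2 hmem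
          simp only [if_neg hc1, if_neg hc2, if_neg hd1, if_neg hd2]
          exact ih nr nc forms isRow isCol R C hvtl hR hC
        · have hc2 : t = 1 ∧ PySem.List.pyGetD isCol i false = false :=
            ⟨ht1, hiffC.mpr hmem⟩
          have hd2 : t = 1 ∧ i ∉ C := ⟨ht1, hmem⟩
          simp only [if_neg hc1, if_pos hc2, if_neg hd1, if_pos hd2]
          have hC' : ArrRel n (PySem.List.pySetD isCol i true) (PySem.Set.add C i) := by
            constructor
            · rw [PySem.List.length_pySetD]; exact hC.1
            · intro j hj0 hjn
              have hi' : i = ((i.toNat : ℕ) : ℤ) := (Int.toNat_of_nonneg hib.1).symm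
              have hj' : j = ((j.toNat : ℕ) : ℤ) := (Int.toNat_of_nonneg hj0).symm
              have hlt : i.toNat < isCol.length := by
                rw [hC.1]; omega
              rw [hi', hj', PySem.List.pyGetD_pySetD_natCast isCol i.toNat j.toNat true false hlt]
              rw [PySem.Set.mem_add]
              by_cases hji : j.toNat = i.toNat
              · have : j = i := by omega
                simp [this]
              · have hne : ¬ j = i := by omega
                rw [if_neg hji]
                rw [← hj', ← hi']
                rw [hC.2 j hj0 hjn]
                simp [hne]
          rw [ih (nr - 1) nc (forms ++ [[nc, v]]) isRow _ R (PySem.Set.add C i) hvtl hR hC']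
          have hone : ¬ ((1 : Int) = 0) := by norm_num
          simp only [counterMap, if_neg hone]
          simp
      · have hc1 : ¬ (t = 0 ∧ PySem.List.pyGetD isRow i false = false) := fun h => ht0 h.1
        have hc2 : ¬ (t = 1 ∧ PySem.List.pyGetD isCol i false = false) := fun h => ht1 h.1
        have hd1 : ¬ (t = 0 ∧ i ∉ R) := fun h => ht0 h.1
        have hd2 : ¬ (t = 1 ∧ i ∉ C) := fun h => ht1 h.1
        simp only [if_neg hc1, if_neg hc2, if_neg hd1, if_neg hd2]
        exact ih nr nc forms isRow isCol R C hvtl hR hC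

lemma arrRel_init (n : Int) :
    ArrRel n ((PySem.List.pyRange 0 n 1).map (fun _ => false)) [] := by
  constructor
  · simp [PySem.List.length_pyRange_one]
  · intro j hj0 hjn
    rw [PySem.List.pyGetD_map_pyRange_of_nonneg _ n j false hj0 hjn]
    simp

-- A reduced to the common core
lemma aport_eq (n : Int) (queries : List (List Int))
    (hpre : ∀ q ∈ queries, Valid n q) :
    matrixSumQueries n queries
      = sumCoeffs (dedupA (PySem.List.enumerate queries).reverse [] []) n n := by
  have hrange : PySem.List.pyRange ((queries.length : Int) - 1) (-1) (-1)
      = (PySem.List.pyRange 0 (queries.length : Int)).reverse := by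
    rw [PySem.List.pyRange_neg_one_eq_reverse]; norm_num
  have henum : (PySem.List.enumerate queries).reverse
      = (PySem.List.pyRange 0 (queries.length : Int)).reverse.map
          (fun j => (j, PySem.List.pyGetD queries j [])) := by
    rw [PySem.List.enumerate_eq_map_pyRange queries []]
    simp [List.map_reverse]
  have hval' : ∀ p ∈ (PySem.List.enumerate queries).reverse, Valid n p.2 := by
    intro p hp
    rw [List.mem_reverse, PySem.List.mem_enumerate_iff] at hp
    obtain ⟨k, hk, rfl⟩ := hp
    exact hpre _ (List.getElem_mem _)
  rw [henum] at hval'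
  simp only [matrixSumQueries]
  rw [hrange]
  have hfold :
      (PySem.List.pyRange 0 (queries.length : Int)).reverse.foldl
        (fun st i =>
          match st with
          | (nr, nc, formulars, isRow, isCol) =>
            match PySem.List.pyGetD queries i [] with
            | [t, idx, val] =>
              if t = 0 ∧ PySem.List.pyGetD isRow idx false = false then
                (nr, nc - 1, formulars ++ [[nr, val]], PySem.List.pySetD isRow idx true, isCol)
              else if t = 1 ∧ PySem.List.pyGetD isCol idx false = false then
                (nr - 1, nc, formulars ++ [[nc, val]], isRow, PySem.List.pySetD isCol idx true)
              else (nr, nc, formulars, isRow, isCol)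
            | _ => (nr, nc, formulars, isRow, isCol))
        (n, n, ([] : List (List Int)),
          (PySem.List.pyRange 0 n 1).map (fun _ => false),
          (PySem.List.pyRange 0 n 1).map (fun _ => false))
      = ((PySem.List.pyRange 0 (queries.length : Int)).reverse.map
          (fun j => (j, PySem.List.pyGetD queries j []))).foldl aStep
        (n, n, ([] : List (List Int)),
          (PySem.List.pyRange 0 n 1).map (fun _ => false),
          (PySem.List.pyRange 0 n 1).map (fun _ => false)) := by
    rw [List.foldl_map]
    refine PySem.List.foldl_congr_mem _ _ _ _ ?_
    intro acc j hj
    obtain ⟨nr, nc, fo, ir, ic⟩ := acc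
    rfl
  rw [hfold,
    afold_main n _ n n [] _ _ [] [] hval' (arrRel_init n) (arrRel_init n),
    List.nil_append, counterMap_sum, henum]
  simp

lemma mem_dedupFirst (xs : List (Int × (Int × Int))) :
    ∀ (S : List Int) (p : Int × (Int × Int)),
    p ∈ dedupFirst xs S ↔ p.1 ∉ S ∧ xs.find? (fun e => e.1 == p.1) = some p := by
  induction xs with
  | nil => intro S p; simp [dedupFirst]
  | cons hd tl ih =>
    intro S p
    simp only [dedupFirst]
    split_ifs with h1
    · rw [ih]
      simp only [List.find?_cons]
      rcases hbe : (hd.1 == p.1) with _ | _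
      · simp
      · have : hd.1 = p.1 := by simpa using hbe
        constructor
        · rintro ⟨hns, _⟩; exact absurd (this ▸ h1) hns
        · rintro ⟨hns, hf⟩; exact absurd (this ▸ h1) hns

    · simp only [List.mem_cons, ih, List.find?_cons]
      rcases hbe : (hd.1 == p.1) with _ | _
      · have hne : hd.1 ≠ p.1 := by simpa using hbe
        simp only
        constructor
        · rintro (rfl | ⟨hns, hf⟩)
          · exact absurd rfl hne
          · refine ⟨fun hmem => hns ?_, hf⟩
            rw [PySem.Set.mem_add]; left; exact hmem
        · rintro ⟨hns, hf⟩
          right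
          refine ⟨fun hmem => ?_, hf⟩
          rw [PySem.Set.mem_add] at hmem
          rcases hmem with h | h
          · exact hns h
          · exact hne h.symm
      · have heq : hd.1 = p.1 := by simpa using hbe
        simp only
        constructor
        · rintro (rfl | ⟨hns, hf⟩)
          · exact ⟨heq ▸ h1, rfl⟩
          · exfalso; apply hns; rw [PySem.Set.mem_add]; right; exact heq.symm
        · rintro ⟨hns, hf⟩
          left; exact (Option.some_inj.mp hf).symm

lemma dedupFirst_keys_nodup (xs : List (Int × (Int × Int))) :
    ∀ S : List Int, ((dedupFirst xs S).map Prod.fst).Nodup ∧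
      ∀ p ∈ dedupFirst xs S, p.1 ∉ S := by
  induction xs with
  | nil => intro S; simp [dedupFirst]
  | cons hd tl ih =>
    intro S
    simp only [dedupFirst]
    split_ifs with h1
    · exact ih S
    · obtain ⟨hnd, hns⟩ := ih (PySem.Set.add S hd.1)
      constructor
      · simp only [List.map_cons, List.nodup_cons]
        refine ⟨?_, hnd⟩
        intro hmem
        obtain ⟨p, hp, hfst⟩ := List.mem_map.mp hmem
        have := hns p hp
        apply this
        rw [PySem.Set.mem_add]; right; exact hfst
      · intro p hp
        rcases List.mem_cons.mp hp with rfl | hp'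
        · exact h1
        · intro hmem
          exact hns p hp' (by rw [PySem.Set.mem_add]; left; exact hmem)

lemma get?_foldl_insert (l : List (Int × (Int × Int))) :
    ∀ (d : PySem.Dict Int (Int × Int)) (k : Int),
    (l.foldl (fun d p => d.insert p.1 p.2) d).get? k =
      (match l.reverse.find? (fun p => p.1 == k) with
       | some p => some p.2
       | none => d.get? k) := by
  induction l with
  | nil => intro d k; simp
  | cons hd tl ih =>
    intro d k
    simp only [List.foldl_cons, List.reverse_cons, List.find?_append]
    rw [ih]
    rcases hf : tl.reverse.find? (fun p => p.1 == k) with _ | p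
    · simp only [hf, Option.none_or]
      rcases hbe : (hd.1 == k) with _ | _
      · have hne : k ≠ hd.1 := by simp at hbe; exact fun h => hbe h.symm
        simp [List.find?, hbe, PySem.Dict.get?_insert_of_ne _ _ hne]
      · have heq : hd.1 = k := by simpa using hbe
        subst heq
        simp [List.find?, PySem.Dict.get?_insert_self]
    · simp [hf]

lemma perm_items_dedupFirst (l : List (Int × (Int × Int))) :
    ((l.foldl (fun d p => d.insert p.1 p.2) PySem.Dict.empty).items).Perm
      (dedupFirst l.reverse []) := by
  have hkeys : ((l.foldl (fun d p => d.insert p.1 p.2) PySem.Dict.empty)).keys.Nodup := by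
    exact PySem.Dict.nodup_keys_foldl_insert_key l Prod.fst (fun _ p => p.2) PySem.Dict.empty
      (by simp)
  have hnd1 : ((l.foldl (fun d p => d.insert p.1 p.2) PySem.Dict.empty)).items.Nodup := by
    have : ((l.foldl (fun d p => d.insert p.1 p.2) PySem.Dict.empty)).items.map Prod.fst
        = ((l.foldl (fun d p => d.insert p.1 p.2) PySem.Dict.empty)).keys := rfl
    exact List.Nodup.of_map Prod.fst (this ▸ hkeys)
  have hnd2 : (dedupFirst l.reverse []).Nodup :=
    List.Nodup.of_map Prod.fst (dedupFirst_keys_nodup l.reverse []).1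
  refine (List.perm_ext_iff_of_nodup hnd1 hnd2).mpr ?_
  intro x
  obtain ⟨k, v⟩ := x
  rw [← PySem.Dict.get?_eq_some_iff_mem_items _ _ _ hkeys, get?_foldl_insert,
    mem_dedupFirst]
  simp only [List.not_mem_nil, not_false_iff, true_and]
  rcases hf : l.reverse.find? (fun p => p.1 == k) with _ | p
  · simp [hf, PySem.Dict.get?_empty]
  · have hpk : p.1 = k := by
      have := List.find?_some hf
      simpa using this
    rw [hf]
    simp only [Option.some_inj]
    constructor
    · intro hv
      obtain ⟨pk, pv⟩ := p
      simp only at hpk hv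
      rw [hpk, hv]
    · intro hp
      rw [hp]

lemma dicts_fst (l : List (Int × List Int)) :
    ∀ d : PySem.Dict Int (Int × Int) × PySem.Dict Int (Int × Int),
    (l.foldl
      (fun (d : PySem.Dict Int (Int × Int) × PySem.Dict Int (Int × Int)) p =>
        if PySem.List.pyGetD p.2 0 0 = 0 then
          (d.1.insert (PySem.List.pyGetD p.2 1 0) (p.1, PySem.List.pyGetD p.2 2 0), d.2)
        else if PySem.List.pyGetD p.2 0 0 = 1 then
          (d.1, d.2.insert (PySem.List.pyGetD p.2 1 0) (p.1, PySem.List.pyGetD p.2 2 0))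
        else d) d).1
    = (l.filter (fun p => PySem.List.pyGetD p.2 0 0 == 0)).foldl bInsStep d.1 := by
  induction l with
  | nil => intro d; simp
  | cons hd tl ih =>
    intro d
    simp only [List.foldl_cons, List.filter_cons]
    by_cases h0 : PySem.List.pyGetD hd.2 0 0 = 0
    · simp [h0, ih, bInsStep]
    · by_cases h1 : PySem.List.pyGetD hd.2 0 0 = 1
      · simp [h1, ih]
      · simp [h0, h1, ih]

lemma dicts_snd (l : List (Int × List Int)) :
    ∀ d : PySem.Dict Int (Int × Int) × PySem.Dict Int (Int × Int),
    (l.foldl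
      (fun (d : PySem.Dict Int (Int × Int) × PySem.Dict Int (Int × Int)) p =>
        if PySem.List.pyGetD p.2 0 0 = 0 then
          (d.1.insert (PySem.List.pyGetD p.2 1 0) (p.1, PySem.List.pyGetD p.2 2 0), d.2)
        else if PySem.List.pyGetD p.2 0 0 = 1 then
          (d.1, d.2.insert (PySem.List.pyGetD p.2 1 0) (p.1, PySem.List.pyGetD p.2 2 0))
        else d) d).2
    = (l.filter (fun p => PySem.List.pyGetD p.2 0 0 == 1)).foldl bInsStep d.2 := by
  induction l with
  | nil => intro d; simp
  | cons hd tl ih =>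
    intro d
    simp only [List.foldl_cons, List.filter_cons]
    by_cases h0 : PySem.List.pyGetD hd.2 0 0 = 0
    · simp [h0, ih]
    · by_cases h1 : PySem.List.pyGetD hd.2 0 0 = 1
      · simp [h1, ih, bInsStep]
      · simp [h0, h1, ih]

def toKV (p : Int × List Int) : Int × (Int × Int) :=
  (PySem.List.pyGetD p.2 1 0, (p.1, PySem.List.pyGetD p.2 2 0))

lemma filter_dedupA_zero (rx : List (Int × List Int)) :
    ∀ (R C : List Int),
    (dedupA rx R C).filter (fun e => e.2.1 == 0)
      = (dedupFirst ((rx.filter (fun p => PySem.List.pyGetD p.2 0 0 == 0)).map toKV) R).map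
          (fun p => (p.2.1, (0 : Int), p.2.2)) := by
  induction rx with
  | nil => intro R C; simp [dedupA, dedupFirst]
  | cons hd tl ih =>
    intro R C
    obtain ⟨tm, q⟩ := hd
    simp only [dedupA, List.filter_cons]
    by_cases h0 : PySem.List.pyGetD q 0 0 = 0
    · by_cases hR : PySem.List.pyGetD q 1 0 ∈ R
      · have : ¬ (PySem.List.pyGetD q 0 0 = 0 ∧ PySem.List.pyGetD q 1 0 ∉ R) := by
          intro h; exact h.2 hR
        have h1 : ¬ (PySem.List.pyGetD q 0 0 = 1 ∧ PySem.List.pyGetD q 1 0 ∉ C) := by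
          intro h; rw [h0] at h; exact absurd h.1 (by norm_num)
        simp [h0, ih, dedupFirst, toKV, hR]
      · simp [h0, hR, ih, dedupFirst, toKV]
    · by_cases h1 : PySem.List.pyGetD q 0 0 = 1 ∧ PySem.List.pyGetD q 1 0 ∉ C
      · have : ¬ (PySem.List.pyGetD q 0 0 = 0 ∧ PySem.List.pyGetD q 1 0 ∉ R) := by
          intro h; exact h0 h.1
        simp [h1, ih]
      · simp [h0, h1, ih]

lemma filter_dedupA_one (rx : List (Int × List Int)) :
    ∀ (R C : List Int),
    (dedupA rx R C).filter (fun e => e.2.1 == 1)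
      = (dedupFirst ((rx.filter (fun p => PySem.List.pyGetD p.2 0 0 == 1)).map toKV) C).map
          (fun p => (p.2.1, (1 : Int), p.2.2)) := by
  induction rx with
  | nil => intro R C; simp [dedupA, dedupFirst]
  | cons hd tl ih =>
    intro R C
    obtain ⟨tm, q⟩ := hd
    simp only [dedupA, List.filter_cons]
    by_cases h1 : PySem.List.pyGetD q 0 0 = 1
    · have h0 : ¬ (PySem.List.pyGetD q 0 0 = 0 ∧ PySem.List.pyGetD q 1 0 ∉ R) := by
        intro h; rw [h1] at h; exact absurd h.1 (by norm_num)
      by_cases hC : PySem.List.pyGetD q 1 0 ∈ C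
      · have : ¬ (PySem.List.pyGetD q 0 0 = 1 ∧ PySem.List.pyGetD q 1 0 ∉ C) := by
          intro h; exact h.2 hC
        simp [h0, this, h1, ih, dedupFirst, toKV, hC]
      · simp [h0, h1, hC, ih, dedupFirst, toKV]
    · by_cases h0 : PySem.List.pyGetD q 0 0 = 0 ∧ PySem.List.pyGetD q 1 0 ∉ R
      · simp [h0, h1, ih]
      · have : ¬ (PySem.List.pyGetD q 0 0 = 1 ∧ PySem.List.pyGetD q 1 0 ∉ C) := by
          intro h; exact h1 h.1
        simp [h0, this, h1, ih]

lemma dedupA_axis (rx : List (Int × List Int)) :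
    ∀ (R C : List Int), ∀ e ∈ dedupA rx R C, e.2.1 = 0 ∨ e.2.1 = 1 := by
  induction rx with
  | nil => intro R C e he; simp [dedupA] at he
  | cons hd tl ih =>
    intro R C e he
    obtain ⟨tm, q⟩ := hd
    simp only [dedupA] at he
    split_ifs at he with h1 h2
    · rcases List.mem_cons.mp he with h | h
      · left; simp [h]
      · exact ih _ _ e h
    · rcases List.mem_cons.mp he with h | h
      · right; simp [h]
      · exact ih _ _ e h
    · exact ih _ _ e he

lemma dedupA_perm_split (rx : List (Int × List Int)) (R C : List Int) :
    ((dedupA rx R C).filter (fun e => e.2.1 == 0) ++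
     (dedupA rx R C).filter (fun e => e.2.1 == 1)).Perm (dedupA rx R C) := by
  have h := List.filter_append_perm (fun e => e.2.1 == 0) (dedupA rx R C)
  have hc : (dedupA rx R C).filter (fun e => !(e.2.1 == 0))
      = (dedupA rx R C).filter (fun e => e.2.1 == 1) := by
    apply List.filter_congr
    intro e he
    rcases dedupA_axis rx R C e he with h0 | h1
    · simp [h0]
    · simp [h1]
  rw [← hc]; exact h

lemma dedupA_fst_sublist (rx : List (Int × List Int)) :
    ∀ (R C : List Int), ((dedupA rx R C).map Prod.fst).Sublist (rx.map Prod.fst) := by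
  induction rx with
  | nil => intro R C; simp [dedupA]
  | cons hd tl ih =>
    intro R C
    obtain ⟨tm, q⟩ := hd
    simp only [dedupA]
    split_ifs with h1 h2
    · simpa using List.Sublist.cons₂ tm (ih _ _)
    · simpa using List.Sublist.cons₂ tm (ih _ _)
    · exact List.Sublist.trans (ih _ _) (List.sublist_cons_self _ _)

-- B reduced to the common core
lemma bport_eq (n : Int) (queries : List (List Int)) :
    matrixSumQueries_alt n queries
      = sumCoeffs (dedupA (PySem.List.enumerate queries).reverse [] []) n n := by
  simp only [matrixSumQueries_alt]
  rw [dicts_fst, dicts_snd]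
  dsimp only
  set l := PySem.List.enumerate queries with hl
  have hrow : (((l.filter (fun p => PySem.List.pyGetD p.2 0 0 == 0)).foldl bInsStep
      PySem.Dict.empty)).items.Perm
      (dedupFirst ((l.reverse.filter (fun p => PySem.List.pyGetD p.2 0 0 == 0)).map toKV) []) := by
    have h1 : (l.filter (fun p => PySem.List.pyGetD p.2 0 0 == 0)).foldl bInsStep
        PySem.Dict.empty
        = ((l.filter (fun p => PySem.List.pyGetD p.2 0 0 == 0)).map toKV).foldl
            (fun d p => d.insert p.1 p.2) PySem.Dict.empty := by
      rw [List.foldl_map]; rfl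
    rw [h1]
    have := perm_items_dedupFirst ((l.filter (fun p => PySem.List.pyGetD p.2 0 0 == 0)).map toKV)
    rwa [← List.map_reverse, ← List.filter_reverse] at this
  have hcol : (((l.filter (fun p => PySem.List.pyGetD p.2 0 0 == 1)).foldl bInsStep
      PySem.Dict.empty)).items.Perm
      (dedupFirst ((l.reverse.filter (fun p => PySem.List.pyGetD p.2 0 0 == 1)).map toKV) []) := by
    have h1 : (l.filter (fun p => PySem.List.pyGetD p.2 0 0 == 1)).foldl bInsStep
        PySem.Dict.empty
        = ((l.filter (fun p => PySem.List.pyGetD p.2 0 0 == 1)).map toKV).foldl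
            (fun d p => d.insert p.1 p.2) PySem.Dict.empty := by
      rw [List.foldl_map]; rfl
    rw [h1]
    have := perm_items_dedupFirst ((l.filter (fun p => PySem.List.pyGetD p.2 0 0 == 1)).map toKV)
    rwa [← List.map_reverse, ← List.filter_reverse] at this
  -- the concatenated tagged values are a permutation of dedupA's output
  have hperm :
      ((((l.filter (fun p => PySem.List.pyGetD p.2 0 0 == 0)).foldl bInsStep
          PySem.Dict.empty)).values.map (fun tv => (tv.1, (0 : Int), tv.2)) ++
       (((l.filter (fun p => PySem.List.pyGetD p.2 0 0 == 1)).foldl bInsStep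
          PySem.Dict.empty)).values.map (fun tv => (tv.1, (1 : Int), tv.2))).Perm
      (dedupA l.reverse [] []) := by
    have hv0 : (((l.filter (fun p => PySem.List.pyGetD p.2 0 0 == 0)).foldl bInsStep
        PySem.Dict.empty)).values.map (fun tv => (tv.1, (0 : Int), tv.2))
        = (((l.filter (fun p => PySem.List.pyGetD p.2 0 0 == 0)).foldl bInsStep
            PySem.Dict.empty)).items.map (fun p => (p.2.1, (0 : Int), p.2.2)) := by
      simp only [PySem.Dict.values, List.map_map]; rfl
    have hv1 : (((l.filter (fun p => PySem.List.pyGetD p.2 0 0 == 1)).foldl bInsStep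
        PySem.Dict.empty)).values.map (fun tv => (tv.1, (1 : Int), tv.2))
        = (((l.filter (fun p => PySem.List.pyGetD p.2 0 0 == 1)).foldl bInsStep
            PySem.Dict.empty)).items.map (fun p => (p.2.1, (1 : Int), p.2.2)) := by
      simp only [PySem.Dict.values, List.map_map]; rfl
    rw [hv0, hv1]
    refine List.Perm.trans (List.Perm.append
      (List.Perm.map _ hrow) (List.Perm.map _ hcol)) ?_
    rw [← filter_dedupA_zero l.reverse [] [], ← filter_dedupA_one l.reverse [] []]
    exact dedupA_perm_split l.reverse [] []
  -- dedupA's output is strictly decreasing in time, so it IS the reverse-sorted list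
  have hpw : (dedupA l.reverse [] []).Pairwise (fun a b => b.1 < a.1) := by
    have h1 : (l.reverse.map Prod.fst).Pairwise (fun a b => (b : Int) < a) := by
      rw [List.map_reverse]
      rw [List.pairwise_reverse]
      have := PySem.List.pairwise_lt_enumerate queries 0
      rw [List.pairwise_map]
      exact this
    have h2 := h1.sublist (dedupA_fst_sublist l.reverse [] [])
    rwa [List.pairwise_map] at h2
  rw [PySem.List.sorted_rev_eq_of_perm_of_pairwise_gt _ _ _ hperm.symm hpw]
  rw [sumCoeffs_fold]
  simp

-- ===== VERDICT (by name: the statement is the Claim_ definition above) =====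
theorem matrixSumQueries_spec : Claim_equal_matrixSumQueries := by
  intro n queries _ hpre
  have hval : ∀ q ∈ queries, Valid n q := by
    intro q hq
    obtain ⟨h3, hb⟩ := hpre q hq
    refine ⟨h3, ?_⟩
    have e0 : PySem.List.pyGetD q 0 0 = q.getD 0 0 := by
      simpa using PySem.List.pyGetD_natCast q 0 0
    have e1 : PySem.List.pyGetD q 1 0 = q.getD 1 0 := by
      simpa using PySem.List.pyGetD_natCast q 1 0
    rw [e0, e1]; exact hb
  show matrixSumQueries n queries = matrixSumQueries_alt n queries
  rw [aport_eq n queries hval, bport_eq]
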